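-- pv_equiv track=rewrite | github.com/bjornefisk/HelixCommit | src/gitreleasegen/parser.py | _strip_leading_blank_lines
-- ===== SOURCE A (Python) =====
-- from typing import Dict, Iterable, List, Optional, Tuple
--
-- def _strip_leading_blank_lines(lines: Iterable[str]) -> List[str]:
--     iterator = iter(lines)
--     stripped: List[str] = []
--     skipping = True
--     for line in iterator:
--         if skipping and not line.strip():
--             continue
--         skipping = False
--         stripped.append(line)
--     return stripped
-- ===== SOURCE B (Python) =====
-- from typing import Iterable, List
--
--
-- def _strip_leading_blank_lines(lines: Iterable[str]) -> List[str]: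
--     items = list(lines)
--     i = 0
--     while i < len(items) and not items[i].strip():
--         i += 1
--     return items[i:]
-- ===== Notes on version B (the rewrite author's own statement) =====
-- stated objective: simpler
-- what changed: Replaces the flag-plus-accumulator pass (skipping boolean, per-line append) with a boundary-finding index scan over the materialized list followed by a single slice.
import Mathlib
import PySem

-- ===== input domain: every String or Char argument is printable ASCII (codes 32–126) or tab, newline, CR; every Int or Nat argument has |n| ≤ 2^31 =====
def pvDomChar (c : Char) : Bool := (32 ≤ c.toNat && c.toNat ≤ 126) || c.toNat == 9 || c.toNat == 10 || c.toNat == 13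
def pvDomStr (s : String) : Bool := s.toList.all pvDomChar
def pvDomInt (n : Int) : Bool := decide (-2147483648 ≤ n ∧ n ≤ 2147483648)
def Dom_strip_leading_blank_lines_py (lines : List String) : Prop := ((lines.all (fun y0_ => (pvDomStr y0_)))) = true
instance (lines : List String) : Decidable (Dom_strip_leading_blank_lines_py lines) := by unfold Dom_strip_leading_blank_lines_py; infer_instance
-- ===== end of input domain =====

-- B drops the leading blank lines by finding the boundary index and slicing once,
-- instead of A's flag-plus-accumulator pass (objective: simpler).

-- ===== PORT A =====
-- for line: if skipping and not line.strip(): continue; skipping = False; stripped.append(line)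
def strip_leading_blank_lines_py (lines : List String) : List String :=
  (lines.foldl
    (fun (st : List String × Bool) line =>
      if st.2 && (PySem.Str.strip line == "") then st
      else (st.1 ++ [line], false))
    ([], true)).1

-- ===== PORT B =====
-- the while-loop: i advances while i < len(items) and not items[i].strip()
def pvScanB (items : List String) (i : Nat) : Nat :=
  if h : i < items.length then
    if PySem.Str.strip items[i] == "" then pvScanB items (i + 1) else i
  else i
termination_by items.length - i

def strip_leading_blank_lines_py_alt (lines : List String) : List String :=
  PySem.List.slice lines (some ((pvScanB lines 0 : Nat) : Int)) none

-- ===== PRECONDITION & SPEC =====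
def Spec_strip_leading_blank_lines_py (lines : List String) (out : List String) : Prop := out = strip_leading_blank_lines_py_alt lines
instance (lines : List String) (out : List String) : Decidable (Spec_strip_leading_blank_lines_py lines out) := by unfold Spec_strip_leading_blank_lines_py; infer_instance

-- ===== CLAIM (what is proved, stated in full; the proofs are below) =====
def Claim_equal_strip_leading_blank_lines_py : Prop := ∀ (lines : List String), Dom_strip_leading_blank_lines_py lines → Spec_strip_leading_blank_lines_py lines (strip_leading_blank_lines_py lines)

-- ===== LEMMAS AND PROOFS =====

-- once skipping is False, A just appends every remaining line
theorem pvFoldlFalse (ls : List String) (acc : List String) :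
    (ls.foldl
      (fun (st : List String × Bool) line =>
        if st.2 && (PySem.Str.strip line == "") then st
        else (st.1 ++ [line], false))
      (acc, false)) = (acc ++ ls, false) := by
  induction ls generalizing acc with
  | nil => simp
  | cons l ls ih =>
    have hstep : (if (acc, false).2 && (PySem.Str.strip l == "") then
          ((acc, false) : List String × Bool)
        else ((acc, false).1 ++ [l], false)) = (acc ++ [l], false) := by simp
    rw [List.foldl_cons, hstep, ih]
    simp

-- A computes dropWhile (blank)
theorem pvA_eq_dropWhile (lines : List String) :
    strip_leading_blank_lines_py lines
      = lines.dropWhile (fun l => PySem.Str.strip l == "") := by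
  unfold strip_leading_blank_lines_py
  induction lines with
  | nil => simp
  | cons l ls ih =>
    rw [List.foldl_cons]
    by_cases h : PySem.Str.strip l == ""
    · have hstep : (if (([], true) : List String × Bool).2 && (PySem.Str.strip l == "") then
            (([] : List String), true)
          else ((([], true) : List String × Bool).1 ++ [l], false)) = (([] : List String), true) := by
        simp [h]
      rw [hstep, ih, List.dropWhile_cons]
      simp [h]
    · have hstep : (if (([], true) : List String × Bool).2 && (PySem.Str.strip l == "") then
            (([], true) : List String × Bool)
          else ((([], true) : List String × Bool).1 ++ [l], false)) = ([l], false) := by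
        simp [h]
      rw [hstep, pvFoldlFalse, List.dropWhile_cons]
      simp [h]

-- shifting the scan by one past a cons
theorem pvScanB_cons_fuel (fuel : Nat) (l : String) (ls : List String) (i : Nat)
    (hf : ls.length - i ≤ fuel) :
    pvScanB (l :: ls) (i + 1) = pvScanB ls i + 1 := by
  induction fuel generalizing i with
  | zero =>
    have h : ¬ i < ls.length := by omega
    unfold pvScanB
    simp [h]
  | succ n ih =>
    by_cases h : i < ls.length
    · unfold pvScanB
      simp only [List.length_cons, Nat.succ_lt_succ_iff, h, dite_true,
        List.getElem_cons_succ]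
      split
      · exact ih (i + 1) (by omega)
      · rfl
    · unfold pvScanB
      simp [h]

theorem pvScanB_cons (l : String) (ls : List String) :
    pvScanB (l :: ls) 1 = pvScanB ls 0 + 1 :=
  pvScanB_cons_fuel ls.length l ls 0 (by omega)

-- B computes dropWhile (blank)
theorem pvB_eq_dropWhile (lines : List String) :
    lines.drop (pvScanB lines 0)
      = lines.dropWhile (fun l => PySem.Str.strip l == "") := by
  induction lines with
  | nil => simp
  | cons l ls ih =>
    unfold pvScanB
    by_cases h : PySem.Str.strip l == ""
    · simpa [h, List.dropWhile_cons, pvScanB_cons] using ih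
    · simp [h]

-- ===== VERDICT (by name: the statement is the Claim_ definition above) =====
theorem strip_leading_blank_lines_py_spec : Claim_equal_strip_leading_blank_lines_py := by
  intro lines _
  unfold Spec_strip_leading_blank_lines_py strip_leading_blank_lines_py_alt
  rw [PySem.List.slice_from_natCast, pvA_eq_dropWhile, pvB_eq_dropWhile]
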